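-- pv_equiv track=rewrite | github.com/enterprise-data-platform-emeka/platform-analytics-agent | agent/report.py | _pick_metric
-- ===== SOURCE A (Python) =====
-- _KPI_PRIORITY = {"revenue", "amount", "sales", "profit", "income", "spend", "price", "value", "payment"}
--
-- _KPI_ANY = {"revenue", "total", "amount", "sales", "profit", "sum", "value", "orders", "avg", "average"}
--
-- _KPI_COUNTS = {"count", "customers", "users", "visitors", "quantity", "qty"}
--
-- _RANK_EXACT = frozenset({"rank", "position", "pos", "row_num", "row_number", "rn", "ntile", "dense_rank"})
--
-- def _is_rank_col(col: str) -> bool: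
--     cl = col.lower()
--     return cl in _RANK_EXACT or cl.endswith("_rank") or cl.endswith("_position") or cl.endswith("_pos")
--
-- def _pick_metric(cols: list[str]) -> str:
--     non_rank = [c for c in cols if not _is_rank_col(c)]
--     cands = non_rank if non_rank else cols
--     for c in cands:
--         if any(h in c.lower() for h in _KPI_PRIORITY):
--             return c
--     for c in cands:
--         if any(h in c.lower() for h in _KPI_ANY) and not any(h in c.lower() for h in _KPI_COUNTS):
--             return c
--     for c in cands:
--         if any(h in c.lower() for h in _KPI_ANY):
--             return c
--     return cands[-1]
-- ===== SOURCE B (Python) =====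
-- _KPI_PRIORITY = {"revenue", "amount", "sales", "profit", "income", "spend", "price", "value", "payment"}
--
-- _KPI_ANY = {"revenue", "total", "amount", "sales", "profit", "sum", "value", "orders", "avg", "average"}
--
-- _KPI_COUNTS = {"count", "customers", "users", "visitors", "quantity", "qty"}
--
-- _RANK_EXACT = frozenset({"rank", "position", "pos", "row_num", "row_number", "rn", "ntile", "dense_rank"})
--
--
-- def _is_rank_col(col: str) -> bool:
--     cl = col.lower()
--     return cl in _RANK_EXACT or cl.endswith("_rank") or cl.endswith("_position") or cl.endswith("_pos")
--
--
-- def _tier(c: str) -> int: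
--     cl = c.lower()
--     if any(h in cl for h in _KPI_PRIORITY):
--         return 1
--     if any(h in cl for h in _KPI_ANY) and not any(h in cl for h in _KPI_COUNTS):
--         return 2
--     if any(h in cl for h in _KPI_ANY):
--         return 3
--     return 4
--
--
-- def _pick_metric(cols: list[str]) -> str:
--     non_rank = [c for c in cols if not _is_rank_col(c)]
--     cands = non_rank if non_rank else cols
--     best = 4
--     for c in cands:
--         best = min(best, _tier(c))
--     if best == 4:
--         return cands[-1]
--     for c in cands:
--         if _tier(c) == best:
--             return c
-- ===== Notes on version B (the rewrite author's own statement) =====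
-- stated objective: alternative
-- what changed: Replaces A's three sequential keyword-filter passes (each restarting the scan with its own predicate) by a numeric tier per column (1=priority, 2=any-and-not-count, 3=any, 4=none): one pass computes the minimal tier, then the first column of that tier is returned, with the last-element fallback when the minimal tier is 4.
import Mathlib
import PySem

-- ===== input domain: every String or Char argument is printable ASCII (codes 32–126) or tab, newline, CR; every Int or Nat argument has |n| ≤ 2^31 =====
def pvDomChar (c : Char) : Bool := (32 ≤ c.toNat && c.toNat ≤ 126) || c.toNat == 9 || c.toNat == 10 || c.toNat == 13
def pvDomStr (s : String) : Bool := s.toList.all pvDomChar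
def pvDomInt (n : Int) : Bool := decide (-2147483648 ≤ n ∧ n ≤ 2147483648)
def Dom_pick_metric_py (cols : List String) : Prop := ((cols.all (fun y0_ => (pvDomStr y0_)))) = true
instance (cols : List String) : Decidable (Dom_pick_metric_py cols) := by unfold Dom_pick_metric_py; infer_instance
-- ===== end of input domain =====

-- B replaces A's three restarting filter passes by a per-column tier and a single min pass; objective: alternative decomposition.

-- ===== PORT A =====
def kpiPriority : List String := ["revenue", "amount", "sales", "profit", "income", "spend", "price", "value", "payment"]

def kpiAny : List String := ["revenue", "total", "amount", "sales", "profit", "sum", "value", "orders", "avg", "average"]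

def kpiCounts : List String := ["count", "customers", "users", "visitors", "quantity", "qty"]

def rankExact : List String := ["rank", "position", "pos", "row_num", "row_number", "rn", "ntile", "dense_rank"]

def isRankCol (col : String) : Bool :=
  let cl := PySem.Str.lower col
  rankExact.contains cl || PySem.Str.endswith cl "_rank" || PySem.Str.endswith cl "_position" || PySem.Str.endswith cl "_pos"

-- any(h in c.lower() for h in ks)
def hasKw (ks : List String) (c : String) : Bool := ks.any (fun h => PySem.Str.isIn h (PySem.Str.lower c))

def pick_metric_py (cols : List String) : String :=
  let non_rank := cols.filter (fun c => !isRankCol c)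
  let cands := if !non_rank.isEmpty then non_rank else cols
  match cands.find? (fun c => hasKw kpiPriority c) with
  | some c => c
  | none =>
    match cands.find? (fun c => hasKw kpiAny c && !hasKw kpiCounts c) with
    | some c => c
    | none =>
      match cands.find? (fun c => hasKw kpiAny c) with
      | some c => c
      | none => (PySem.List.pyGet? cands (-1)).getD ""   -- cands[-1]; IndexError (empty cands) excluded by Pre_

-- ===== PORT B =====
def tierOf (c : String) : Nat :=
  if hasKw kpiPriority c then 1
  else if hasKw kpiAny c && !hasKw kpiCounts c then 2
  else if hasKw kpiAny c then 3
  else 4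

def pick_metric_py_alt (cols : List String) : String :=
  let non_rank := cols.filter (fun c => !isRankCol c)
  let cands := if !non_rank.isEmpty then non_rank else cols
  let best := cands.foldl (fun m c => min m (tierOf c)) 4
  if best == 4 then (PySem.List.pyGet? cands (-1)).getD ""   -- cands[-1]; empty cands excluded by Pre_
  else
    match cands.find? (fun c => tierOf c == best) with
    | some c => c
    | none => ""   -- unreachable: best < 4 means some column attains it

-- ===== PRECONDITION & SPEC =====
-- Pre_ excludes only the empty list, on which A (and B) raise IndexError via cands[-1].
def Pre_pick_metric_py (cols : List String) : Prop := cols ≠ []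
instance (cols : List String) : Decidable (Pre_pick_metric_py cols) := by unfold Pre_pick_metric_py; infer_instance
def pvWitness_pick_metric_py : List String := (["revenue"])

def Spec_pick_metric_py (cols : List String) (out : String) : Prop := out = pick_metric_py_alt cols
instance (cols : List String) (out : String) : Decidable (Spec_pick_metric_py cols out) := by unfold Spec_pick_metric_py; infer_instance

-- ===== CLAIM (what is proved, stated in full; the proofs are below) =====
def Claim_equal_pick_metric_py : Prop := ∀ (cols : List String), Dom_pick_metric_py cols → Pre_pick_metric_py cols → Spec_pick_metric_py cols (pick_metric_py cols)

-- ===== LEMMAS AND PROOFS =====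

theorem tier_ge_one (c : String) : 1 ≤ tierOf c := by
  unfold tierOf; split_ifs <;> omega

theorem tier_le_four (c : String) : tierOf c ≤ 4 := by
  unfold tierOf; split_ifs <;> omega

theorem pri_iff_tier (c : String) : hasKw kpiPriority c = (tierOf c == 1) := by
  unfold tierOf; split_ifs <;> simp_all

theorem anyNoCnt_iff_tier (c : String) (h : tierOf c ≠ 1) :
    (hasKw kpiAny c && !hasKw kpiCounts c) = (tierOf c == 2) := by
  unfold tierOf at *; split_ifs at * <;> simp_all

theorem anyK_iff_tier (c : String) (h1 : tierOf c ≠ 1) (h2 : tierOf c ≠ 2) :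
    hasKw kpiAny c = (tierOf c == 3) := by
  unfold tierOf at *; split_ifs at * <;> simp_all

theorem find?_congr_mem {α : Type} (l : List α) (p q : α → Bool)
    (h : ∀ x ∈ l, p x = q x) : l.find? p = l.find? q := by
  induction l with
  | nil => rfl
  | cons a t ih =>
    simp only [List.find?_cons]
    rw [h a (by simp)]
    cases q a
    · exact ih (fun x hx => h x (by simp [hx]))
    · rfl

theorem fold_le_acc (l : List String) (a : Nat) :
    l.foldl (fun m c => min m (tierOf c)) a ≤ a := by
  induction l generalizing a with
  | nil => simp
  | cons c t ih =>
    simp only [List.foldl_cons]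
    exact le_trans (ih _) (Nat.min_le_left _ _)

theorem fold_le_mem (l : List String) (a : Nat) (c : String) (hc : c ∈ l) :
    l.foldl (fun m c => min m (tierOf c)) a ≤ tierOf c := by
  induction l generalizing a with
  | nil => simp at hc
  | cons b t ih =>
    simp only [List.foldl_cons]
    rcases List.mem_cons.mp hc with h | h
    · subst h
      exact le_trans (fold_le_acc _ _) (Nat.min_le_right _ _)
    · exact ih _ h

theorem fold_attained (l : List String) (a : Nat) :
    l.foldl (fun m c => min m (tierOf c)) a = a ∨
      ∃ c ∈ l, tierOf c = l.foldl (fun m c => min m (tierOf c)) a := by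
  induction l generalizing a with
  | nil => left; rfl
  | cons b t ih =>
    simp only [List.foldl_cons]
    rcases ih (min a (tierOf b)) with h | ⟨c, hc, hv⟩
    · rw [h]
      rcases Nat.le_total a (tierOf b) with hle | hle
      · left; omega
      · right; exact ⟨b, by simp, by omega⟩
    · right; exact ⟨c, by simp [hc], hv⟩

-- A = B on any nonempty candidate list
theorem main_lemma (cands : List String) (hne : cands ≠ []) :
    (match cands.find? (fun c => hasKw kpiPriority c) with
     | some c => c
     | none =>
       match cands.find? (fun c => hasKw kpiAny c && !hasKw kpiCounts c) with
       | some c => c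
       | none =>
         match cands.find? (fun c => hasKw kpiAny c) with
         | some c => c
         | none => (PySem.List.pyGet? cands (-1)).getD "") =
    (if cands.foldl (fun m c => min m (tierOf c)) 4 == 4 then (PySem.List.pyGet? cands (-1)).getD ""
     else
       match cands.find? (fun c => tierOf c == cands.foldl (fun m c => min m (tierOf c)) 4) with
       | some c => c
       | none => "") := by
  set best := cands.foldl (fun m c => min m (tierOf c)) 4 with hbest
  have hb4 : best ≤ 4 := fold_le_acc _ _
  have hmem : ∀ c ∈ cands, best ≤ tierOf c := fun c hc => fold_le_mem _ _ c hc
  have hatt : ∃ c ∈ cands, tierOf c = best := by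
    rcases fold_attained cands 4 with h | h
    · rw [← hbest] at h
      obtain ⟨c, hc⟩ := List.exists_mem_of_ne_nil cands hne
      exact ⟨c, hc, le_antisymm (by rw [h]; exact tier_le_four c) (by rw [h] at hmem ⊢; exact hmem c hc)⟩
    · exact h
  have hb1 : 1 ≤ best := by
    obtain ⟨c, _, hc⟩ := hatt
    rw [← hc]; exact tier_ge_one c
  -- rewrite A's first pass predicate
  have hp1 : cands.find? (fun c => hasKw kpiPriority c) = cands.find? (fun c => tierOf c == 1) :=
    find?_congr_mem _ _ _ (fun c _ => pri_iff_tier c)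
  interval_cases best
  · -- best = 1
    obtain ⟨c, hc, hct⟩ := hatt
    have : (cands.find? (fun c => tierOf c == 1)).isSome := by
      rw [List.find?_isSome]; exact ⟨c, hc, by simp [hct]⟩
    simp only [hp1]
    cases hfind : cands.find? (fun c => tierOf c == 1) with
    | none => rw [hfind] at this; simp at this
    | some d => simp
  · -- best = 2
    have hno1 : ∀ c ∈ cands, tierOf c ≠ 1 := fun c hc => by have := hmem c hc; omega
    have h1 : cands.find? (fun c => tierOf c == 1) = none := by
      rw [List.find?_eq_none]; intro c hc; simp [hno1 c hc]
    have hp2 : cands.find? (fun c => hasKw kpiAny c && !hasKw kpiCounts c)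
        = cands.find? (fun c => tierOf c == 2) :=
      find?_congr_mem _ _ _ (fun c hc => anyNoCnt_iff_tier c (hno1 c hc))
    obtain ⟨c, hc, hct⟩ := hatt
    have hsome : (cands.find? (fun c => tierOf c == 2)).isSome := by
      rw [List.find?_isSome]; exact ⟨c, hc, by simp [hct]⟩
    simp only [hp1, h1, hp2]
    cases hfind : cands.find? (fun c => tierOf c == 2) with
    | none => rw [hfind] at hsome; simp at hsome
    | some d => simp
  · -- best = 3
    have hno12 : ∀ c ∈ cands, tierOf c ≠ 1 ∧ tierOf c ≠ 2 := fun c hc => by have := hmem c hc; omega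
    have h1 : cands.find? (fun c => tierOf c == 1) = none := by
      rw [List.find?_eq_none]; intro c hc; simp [(hno12 c hc).1]
    have hp2 : cands.find? (fun c => hasKw kpiAny c && !hasKw kpiCounts c)
        = cands.find? (fun c => tierOf c == 2) :=
      find?_congr_mem _ _ _ (fun c hc => anyNoCnt_iff_tier c (hno12 c hc).1)
    have h2 : cands.find? (fun c => tierOf c == 2) = none := by
      rw [List.find?_eq_none]; intro c hc; simp [(hno12 c hc).2]
    have hp3 : cands.find? (fun c => hasKw kpiAny c) = cands.find? (fun c => tierOf c == 3) :=
      find?_congr_mem _ _ _ (fun c hc => anyK_iff_tier c (hno12 c hc).1 (hno12 c hc).2)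
    obtain ⟨c, hc, hct⟩ := hatt
    have hsome : (cands.find? (fun c => tierOf c == 3)).isSome := by
      rw [List.find?_isSome]; exact ⟨c, hc, by simp [hct]⟩
    simp only [hp1, h1, hp2, h2, hp3]
    cases hfind : cands.find? (fun c => tierOf c == 3) with
    | none => rw [hfind] at hsome; simp at hsome
    | some d => simp
  · -- best = 4 : every tier is 4, all passes empty, both fall back to cands[-1]
    have hall : ∀ c ∈ cands, tierOf c = 4 := fun c hc => by
      have := hmem c hc; have := tier_le_four c; omega
    have h1 : cands.find? (fun c => tierOf c == 1) = none := by
      rw [List.find?_eq_none]; intro c hc; simp [hall c hc]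
    have hp2 : cands.find? (fun c => hasKw kpiAny c && !hasKw kpiCounts c)
        = cands.find? (fun c => tierOf c == 2) :=
      find?_congr_mem _ _ _ (fun c hc => anyNoCnt_iff_tier c (by rw [hall c hc]; omega))
    have h2 : cands.find? (fun c => tierOf c == 2) = none := by
      rw [List.find?_eq_none]; intro c hc; simp [hall c hc]
    have hp3 : cands.find? (fun c => hasKw kpiAny c) = cands.find? (fun c => tierOf c == 3) :=
      find?_congr_mem _ _ _ (fun c hc => anyK_iff_tier c (by rw [hall c hc]; omega) (by rw [hall c hc]; omega))
    have h3 : cands.find? (fun c => tierOf c == 3) = none := by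
      rw [List.find?_eq_none]; intro c hc; simp [hall c hc]
    simp only [hp1, h1, hp2, h2, hp3, h3]
    simp

-- ===== VERDICT (by name: the statement is the Claim_ definition above) =====
theorem pick_metric_py_spec : Claim_equal_pick_metric_py := by
  intro cols _ hpre
  unfold Spec_pick_metric_py pick_metric_py pick_metric_py_alt
  dsimp only
  have hcne : (if !(cols.filter (fun c => !isRankCol c)).isEmpty then cols.filter (fun c => !isRankCol c) else cols) ≠ [] := by
    split
    · next h => simpa [List.isEmpty_iff] using h
    · exact hpre
  exact main_lemma _ hcne
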